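-- pv_equiv track=rewrite | github.com/mattyws/organism_resistance | get_patients_org_names.py | get_organism_class
-- ===== SOURCE A (Python) =====
-- def get_organism_class(events, ab_classes):
--     organism_count = dict()
--     org_item_label = "ORG_ITEMID"
--     interpretation_label = "interpretation"
--     ab_name_label = 'ANTIBODY'
--     for event in events:
--         if org_item_label in event.keys():
--             if event[org_item_label] not in organism_count.keys():
--                 organism_count[event[org_item_label]] = set()
--             if event[interpretation_label] == 'R':
--                 organism_count[event[org_item_label]].add(ab_classes[event[ab_name_label]])
--     for key in organism_count:
--         if len(organism_count[key]) >= 3: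
--             return organism_count, "R"
--     return organism_count, "S"
-- ===== SOURCE B (Python) =====
-- def get_organism_class(events, ab_classes):
--     # Group-by-rescanning: filter relevant events, dedup organism ids in first-occurrence
--     # order, then build each organism's resistant-class set by its own filtered scan.
--     kept = [e for e in events if "ORG_ITEMID" in e]
--     orgs = []
--     for e in kept:
--         if e["ORG_ITEMID"] not in orgs:
--             orgs.append(e["ORG_ITEMID"])
--     organism_count = {
--         org: {ab_classes[e["ANTIBODY"]] for e in kept
--               if e["ORG_ITEMID"] == org and e["interpretation"] == "R"}
--         for org in orgs
--     }
--     flag = "R" if any(len(s) >= 3 for s in organism_count.values()) else "S"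
--     return organism_count, flag
-- ===== Notes on version B (the rewrite author's own statement) =====
-- stated objective: alternative
-- what changed: B abandons A's single-pass incremental dict mutation with early-return key scan and instead groups by rescanning: it filters the relevant events, dedups organism ids in first-occurrence order, builds each organism's resistant-class set by an independent filtered scan of the events (a dict comprehension), and computes the flag with any().
import Mathlib
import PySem

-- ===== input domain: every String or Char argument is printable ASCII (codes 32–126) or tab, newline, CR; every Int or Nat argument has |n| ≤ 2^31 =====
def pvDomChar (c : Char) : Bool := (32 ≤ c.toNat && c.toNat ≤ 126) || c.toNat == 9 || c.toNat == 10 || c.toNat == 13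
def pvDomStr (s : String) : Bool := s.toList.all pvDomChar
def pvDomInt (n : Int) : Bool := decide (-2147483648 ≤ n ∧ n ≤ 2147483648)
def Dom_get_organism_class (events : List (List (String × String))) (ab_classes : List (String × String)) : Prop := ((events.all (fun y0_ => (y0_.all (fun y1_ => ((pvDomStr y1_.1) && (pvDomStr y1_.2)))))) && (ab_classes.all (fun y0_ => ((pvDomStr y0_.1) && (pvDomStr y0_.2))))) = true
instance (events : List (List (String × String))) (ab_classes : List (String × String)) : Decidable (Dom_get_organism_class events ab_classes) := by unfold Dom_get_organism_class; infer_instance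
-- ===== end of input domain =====

-- B groups by rescanning (filter events, dedup organism ids, per-organism filtered scan, any()) instead of A's incremental dict mutation with an early-return key scan; alternative decomposition, same behaviour.


-- ===== PORT A =====
-- A's per-event body: ensure the organism has a set; on interpretation 'R' add the antibiotic's class.
-- (On inputs in Pre_ every getD key is present, so the "" defaults are never the looked-up value.)
def pvAStep (ab : PySem.Dict String String) (d : PySem.Dict String (PySem.Set String))
    (ev : List (String × String)) : PySem.Dict String (PySem.Set String) :=
  let e := PySem.Dict.mk ev
  if e.contains "ORG_ITEMID" then
    let d1 := if !(d.contains (e.getD "ORG_ITEMID" "")) then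
                d.insert (e.getD "ORG_ITEMID" "") PySem.Set.empty
              else d
    if e.getD "interpretation" "" == "R" then
      d1.modify (e.getD "ORG_ITEMID" "") PySem.Set.empty
        (fun s => PySem.Set.add s (ab.getD (e.getD "ANTIBODY" "") ""))
    else d1
  else d

def get_organism_class (events : List (List (String × String))) (ab_classes : List (String × String)) : (List (String × List String)) × String :=
  let ab := PySem.Dict.mk ab_classes
  let d := events.foldl (pvAStep ab) PySem.Dict.empty
  -- 'for key in organism_count: if len(...) >= 3: return …, "R"' — the early-return scan over the keys
  match d.keys.find? (fun k => 3 ≤ PySem.Set.len (d.getD k PySem.Set.empty)) with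
  | some _ => (d.items, "R")
  | none => (d.items, "S")

-- ===== PORT B =====
-- B: the set comprehension for one organism — an independent filtered scan of the kept events.
def pvBSetFor (ab : PySem.Dict String String) (kept : List (List (String × String)))
    (org : String) : PySem.Set String :=
  kept.foldl (fun s ev =>
    let e := PySem.Dict.mk ev
    if e.getD "ORG_ITEMID" "" == org && e.getD "interpretation" "" == "R" then
      PySem.Set.add s (ab.getD (e.getD "ANTIBODY" "") "")
    else s) PySem.Set.empty

def get_organism_class_alt (events : List (List (String × String))) (ab_classes : List (String × String)) : (List (String × List String)) × String :=
  let ab := PySem.Dict.mk ab_classes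
  -- kept = [e for e in events if "ORG_ITEMID" in e]
  let kept := events.filter (fun ev => (PySem.Dict.mk ev).contains "ORG_ITEMID")
  -- orgs: first-occurrence dedup of the organism ids ('if x not in orgs: orgs.append(x)')
  let orgs := PySem.Set.ofList (kept.map (fun ev => (PySem.Dict.mk ev).getD "ORG_ITEMID" ""))
  -- the dict comprehension {org: {...} for org in orgs}
  let d := PySem.Dict.mk (orgs.map (fun org => (org, pvBSetFor ab kept org)))
  (d.items, if d.values.any (fun s => 3 ≤ PySem.Set.len s) then "R" else "S")

-- ===== PRECONDITION & SPEC =====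
-- Pre_ excludes exactly the inputs where Python A raises KeyError: an event that has 'ORG_ITEMID'
-- but lacks 'interpretation', or has interpretation 'R' but lacks 'ANTIBODY' or its antibody is not in ab_classes.
def Pre_get_organism_class (events : List (List (String × String))) (ab_classes : List (String × String)) : Prop :=
  ∀ ev ∈ events,
    (PySem.Dict.mk ev).contains "ORG_ITEMID" = true →
      (PySem.Dict.mk ev).contains "interpretation" = true ∧
      ((PySem.Dict.mk ev).getD "interpretation" "" = "R" →
        (PySem.Dict.mk ev).contains "ANTIBODY" = true ∧
        (PySem.Dict.mk ab_classes).contains ((PySem.Dict.mk ev).getD "ANTIBODY" "") = true)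
instance (events : List (List (String × String))) (ab_classes : List (String × String)) : Decidable (Pre_get_organism_class events ab_classes) := by unfold Pre_get_organism_class; infer_instance

def pvWitness_get_organism_class : (List (List (String × String))) × (List (String × String)) :=
  ([[("ORG_ITEMID", "org1"), ("interpretation", "R"), ("ANTIBODY", "pen")],
    [("ORG_ITEMID", "org1"), ("interpretation", "S"), ("ANTIBODY", "amp")]],
   [("pen", "c1"), ("amp", "c2")])

def Spec_get_organism_class (events : List (List (String × String))) (ab_classes : List (String × String)) (out : (List (String × List String)) × String) : Prop := out = get_organism_class_alt events ab_classes
instance (events : List (List (String × String))) (ab_classes : List (String × String)) (out : (List (String × List String)) × String) : Decidable (Spec_get_organism_class events ab_classes out) := by unfold Spec_get_organism_class; infer_instance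

-- ===== CLAIM (what is proved, stated in full; the proofs are below) =====
def Claim_equal_get_organism_class : Prop := ∀ (events : List (List (String × String))) (ab_classes : List (String × String)), Dom_get_organism_class events ab_classes → Pre_get_organism_class events ab_classes → Spec_get_organism_class events ab_classes (get_organism_class events ab_classes)

-- ===== LEMMAS AND PROOFS =====

-- abbreviations used only by the proofs
def pvKept (events : List (List (String × String))) : List (List (String × String)) :=
  events.filter (fun ev => (PySem.Dict.mk ev).contains "ORG_ITEMID")
def pvOrgs (events : List (List (String × String))) : PySem.Set String :=
  PySem.Set.ofList ((pvKept events).map (fun ev => (PySem.Dict.mk ev).getD "ORG_ITEMID" ""))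

-- B's comprehension scan over one more event.
theorem pvBSetFor_append (ab : PySem.Dict String String) (kept : List (List (String × String)))
    (ev : List (String × String)) (org : String) :
    pvBSetFor ab (kept ++ [ev]) org =
      if ((PySem.Dict.mk ev).getD "ORG_ITEMID" "" == org
          && (PySem.Dict.mk ev).getD "interpretation" "" == "R") then
        PySem.Set.add (pvBSetFor ab kept org) (ab.getD ((PySem.Dict.mk ev).getD "ANTIBODY" "") "")
      else pvBSetFor ab kept org := by
  unfold pvBSetFor
  rw [List.foldl_append]
  rfl

-- inserting-the-empty-set-if-new never changes any lookup (the default IS the empty set).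
theorem pvD1_getD (d : PySem.Dict String (PySem.Set String)) (o k : String) :
    (if !(d.contains o) then d.insert o PySem.Set.empty else d).getD k PySem.Set.empty
      = d.getD k PySem.Set.empty := by
  by_cases hco : d.contains o = true
  · simp [hco]
  · simp only [Bool.not_eq_true] at hco
    rw [if_pos (by simp [hco]), PySem.Dict.getD_insert]
    split_ifs with hk
    · subst hk; simp [PySem.Dict.getD_of_not_contains, hco]
    · rfl

-- A's per-event step, seen through getD.
theorem pvAStep_getD (ab : PySem.Dict String String) (d : PySem.Dict String (PySem.Set String))
    (ev : List (String × String)) (org : String)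
    (hc : (PySem.Dict.mk ev).contains "ORG_ITEMID" = true) :
    (pvAStep ab d ev).getD org PySem.Set.empty =
      if ((PySem.Dict.mk ev).getD "ORG_ITEMID" "" == org
          && (PySem.Dict.mk ev).getD "interpretation" "" == "R") then
        PySem.Set.add (d.getD org PySem.Set.empty) (ab.getD ((PySem.Dict.mk ev).getD "ANTIBODY" "") "")
      else d.getD org PySem.Set.empty := by
  unfold pvAStep
  rw [if_pos hc]
  by_cases hr : ((PySem.Dict.mk ev).getD "interpretation" "" == "R") = true
  · simp only [hr, if_pos, Bool.and_true]
    rw [PySem.Dict.getD_modify, pvD1_getD, pvD1_getD]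
    by_cases hoo : (PySem.Dict.mk ev).getD "ORG_ITEMID" "" = org
    · rw [hoo]; simp
    · have h1 : ((PySem.Dict.mk ev).getD "ORG_ITEMID" "" == org) = false := by
        simp [hoo]
      have h2 : org ≠ (PySem.Dict.mk ev).getD "ORG_ITEMID" "" := fun h => hoo h.symm
      simp [h1, h2]
  · simp only [Bool.not_eq_true] at hr
    simp only [hr, Bool.false_eq_true, if_false, Bool.and_false]
    exact pvD1_getD d _ org

-- getD through A's whole loop equals B's per-organism filtered scan (for EVERY org).
theorem pvGetD_fold (ab : PySem.Dict String String) (events : List (List (String × String))) (org : String) :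
    (events.foldl (pvAStep ab) PySem.Dict.empty).getD org PySem.Set.empty
      = pvBSetFor ab (pvKept events) org := by
  induction events using List.reverseRecOn with
  | nil => simp [pvKept, pvBSetFor]
  | append_singleton evs ev ih =>
    rw [List.foldl_append, List.foldl_cons, List.foldl_nil]
    unfold pvKept at ih ⊢
    rw [List.filter_append]
    by_cases hc : (PySem.Dict.mk ev).contains "ORG_ITEMID" = true
    · have hfil : List.filter (fun ev => (PySem.Dict.mk ev).contains "ORG_ITEMID") [ev] = [ev] := by
        simp only [List.filter_cons, List.filter_nil, hc]; rfl
      rw [hfil, pvAStep_getD ab _ ev org hc, pvBSetFor_append, ih]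
    · simp only [Bool.not_eq_true] at hc
      have hfil : List.filter (fun ev => (PySem.Dict.mk ev).contains "ORG_ITEMID") [ev] = [] := by
        simp only [List.filter_cons, List.filter_nil, hc]; rfl
      rw [hfil, List.append_nil]
      simp only [pvAStep, hc, Bool.false_eq_true, if_false]
      exact ih

-- A's per-event step, seen through the key list: it adds the organism id as to a set.
theorem pvAStep_keys (ab : PySem.Dict String String) (d : PySem.Dict String (PySem.Set String))
    (ev : List (String × String))
    (hc : (PySem.Dict.mk ev).contains "ORG_ITEMID" = true) :
    (pvAStep ab d ev).keys = PySem.Set.add d.keys ((PySem.Dict.mk ev).getD "ORG_ITEMID" "") := by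
  unfold pvAStep
  rw [if_pos hc]
  have hk1 : (if !(d.contains ((PySem.Dict.mk ev).getD "ORG_ITEMID" "")) then
        d.insert ((PySem.Dict.mk ev).getD "ORG_ITEMID" "") PySem.Set.empty else d).keys
      = PySem.Set.add d.keys ((PySem.Dict.mk ev).getD "ORG_ITEMID" "") := by
    by_cases hco : d.contains ((PySem.Dict.mk ev).getD "ORG_ITEMID" "") = true
    · rw [if_neg (by simp [hco])]
      rw [PySem.Set.add_of_mem (by rwa [← PySem.Dict.contains_iff_mem_keys])]
    · simp only [Bool.not_eq_true] at hco
      rw [if_pos (by simp [hco]), PySem.Dict.keys_insert_of_not_contains _ _ hco]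
      rw [PySem.Set.add_of_not_mem (by rw [← PySem.Dict.contains_iff_mem_keys]; simp [hco])]
  have hc1 : (if !(d.contains ((PySem.Dict.mk ev).getD "ORG_ITEMID" "")) then
        d.insert ((PySem.Dict.mk ev).getD "ORG_ITEMID" "") PySem.Set.empty else d).contains
        ((PySem.Dict.mk ev).getD "ORG_ITEMID" "") = true := by
    by_cases hco : d.contains ((PySem.Dict.mk ev).getD "ORG_ITEMID" "") = true
    · rw [if_neg (by simp [hco])]; exact hco
    · simp only [Bool.not_eq_true] at hco
      rw [if_pos (by simp [hco])]
      exact PySem.Dict.contains_insert_self _ _ _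
  by_cases hr : ((PySem.Dict.mk ev).getD "interpretation" "" == "R") = true
  · simp only [hr, if_pos]
    rw [PySem.Dict.keys_modify, PySem.Dict.keys_insert_of_contains _ _ hc1, hk1]
  · simp only [Bool.not_eq_true] at hr
    simp only [hr, Bool.false_eq_true, if_false]
    exact hk1

-- A's loop produces exactly the deduped organism ids as keys, in first-occurrence order.
theorem pvKeys_fold (ab : PySem.Dict String String) (events : List (List (String × String))) :
    (events.foldl (pvAStep ab) PySem.Dict.empty).keys = pvOrgs events := by
  induction events using List.reverseRecOn with
  | nil => simp [pvOrgs, pvKept, PySem.Set.ofList_nil]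
  | append_singleton evs ev ih =>
    rw [List.foldl_append, List.foldl_cons, List.foldl_nil]
    unfold pvOrgs pvKept at ih ⊢
    rw [List.filter_append]
    by_cases hc : (PySem.Dict.mk ev).contains "ORG_ITEMID" = true
    · have hfil : List.filter (fun ev => (PySem.Dict.mk ev).contains "ORG_ITEMID") [ev] = [ev] := by
        simp only [List.filter_cons, List.filter_nil, hc]; rfl
      rw [hfil, List.map_append, pvAStep_keys ab _ ev hc, ih]
      simp [PySem.Set.ofList_append_singleton]
    · simp only [Bool.not_eq_true] at hc
      have hfil : List.filter (fun ev => (PySem.Dict.mk ev).contains "ORG_ITEMID") [ev] = [] := by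
        simp only [List.filter_cons, List.filter_nil, hc]; rfl
      rw [hfil, List.append_nil]
      simp only [pvAStep, hc, Bool.false_eq_true, if_false]
      exact ih

-- Early-return key scan agrees with any() over the values, for a nodup-keyed dict.
theorem pvScan_eq_any (d : PySem.Dict String (PySem.Set String)) (h : d.keys.Nodup) :
    (match d.keys.find? (fun k => 3 ≤ PySem.Set.len (d.getD k PySem.Set.empty)) with
      | some _ => ((d.items, "R") : (List (String × List String)) × String)
      | none => (d.items, "S")) =
    (d.items, if d.values.any (fun s => 3 ≤ PySem.Set.len s) then "R" else "S") := by
  have hv : d.values = d.keys.map (fun k => d.getD k PySem.Set.empty) :=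
    PySem.Dict.values_eq_map_keys d h PySem.Set.empty
  rw [hv, List.any_map]
  by_cases hfind : (d.keys.find? (fun k => 3 ≤ PySem.Set.len (d.getD k PySem.Set.empty))).isSome = true
  · obtain ⟨k, hk⟩ := Option.isSome_iff_exists.mp hfind
    rw [hk]
    have hex : ∃ x ∈ d.keys, 3 ≤ List.length (d.getD x []) :=
      ⟨k, List.mem_of_find?_eq_some hk, by simpa [PySem.Set.len] using List.find?_some hk⟩
    simp [hex]
  · rw [Option.not_isSome_iff_eq_none] at hfind
    rw [hfind]
    have hall : ∀ x ∈ d.keys, List.length (d.getD x []) < 3 := by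
      intro k hk
      have := List.find?_eq_none.mp hfind k hk
      simpa [PySem.Set.len] using this
    simp
    exact hall

-- A's dict equals B's comprehension dict.
theorem pvDict_eq (ab : PySem.Dict String String) (events : List (List (String × String))) :
    events.foldl (pvAStep ab) PySem.Dict.empty
      = PySem.Dict.mk ((pvOrgs events).map (fun org => (org, pvBSetFor ab (pvKept events) org))) := by
  apply PySem.Dict.ext
  have hnd : (events.foldl (pvAStep ab) PySem.Dict.empty).keys.Nodup := by
    rw [pvKeys_fold]; exact PySem.Set.nodup_ofList _
  rw [PySem.Dict.items_eq_map_keys _ hnd PySem.Set.empty, pvKeys_fold]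
  have hmk : (PySem.Dict.mk ((pvOrgs events).map (fun org => (org, pvBSetFor ab (pvKept events) org)))).items
      = (pvOrgs events).map (fun org => (org, pvBSetFor ab (pvKept events) org)) := rfl
  rw [hmk]
  apply List.map_congr_left
  intro org _
  rw [pvGetD_fold]

-- ===== VERDICT (by name: the statement is the Claim_ definition above) =====
theorem get_organism_class_spec : Claim_equal_get_organism_class := by
  intro events ab_classes _ _
  unfold Spec_get_organism_class
  show get_organism_class events ab_classes = get_organism_class_alt events ab_classes
  have hd := pvDict_eq (PySem.Dict.mk ab_classes) events
  have hnd : (events.foldl (pvAStep (PySem.Dict.mk ab_classes)) PySem.Dict.empty).keys.Nodup := by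
    rw [pvKeys_fold]; exact PySem.Set.nodup_ofList _
  unfold pvOrgs pvKept at hd
  simp only [get_organism_class, get_organism_class_alt]
  rw [hd] at hnd ⊢
  exact pvScan_eq_any _ hnd
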